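-- pv_equiv track=rewrite | github.com/amrish-kanwat/ml-intern-assessment | ml-assignment/src/utils.py | replace_unk_words
-- ===== SOURCE A (Python) =====
-- from collections import Counter
--
-- def replace_unk_words(tokenized, min_freq=2, unk_token="<UNK>"):
--     """
--     Replaces rare words (frequency <= min_freq) with <UNK>
--     """
--     freq = Counter()
--
--     for sentence in tokenized:
--         freq.update(sentence)
--
--     vocab = set()
--     for word, count in freq.items():
--         if count >= min_freq:
--             vocab.add(word)
--
--     new_tokenized = []
--     for sentence in tokenized:
--         new_sentence = []
--         for word in sentence:
--             if word in vocab: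
--                 new_sentence.append(word)
--             else:
--                 new_sentence.append(unk_token)
--         new_tokenized.append(new_sentence)
--
--     vocab.add(unk_token)
--     return new_tokenized, vocab
-- ===== SOURCE B (Python) =====
-- def replace_unk_words(tokenized, min_freq=2, unk_token="<UNK>"):
--     # Sort-and-scan instead of hashing: sort all words, find frequent words
--     # as runs of length >= min_freq in the sorted list, then rewrite,
--     # collecting the returned vocab while rewriting.
--     sw = sorted(w for sentence in tokenized for w in sentence)
--     keep = set()
--     prev = None
--     run = 0
--     for w in sw:
--         run = run + 1 if w == prev else 1
--         if run >= min_freq: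
--             keep.add(w)
--         prev = w
--     vocab = set()
--     new_tokenized = []
--     for sentence in tokenized:
--         new_sentence = []
--         for w in sentence:
--             if w in keep:
--                 new_sentence.append(w)
--                 vocab.add(w)
--             else:
--                 new_sentence.append(unk_token)
--         new_tokenized.append(new_sentence)
--     vocab.add(unk_token)
--     return new_tokenized, vocab
-- ===== Notes on version B (the rewrite author's own statement) =====
-- stated objective: alternative
-- what changed: B replaces the Counter hash-counting pass and the pass over freq.items() by sorting the flattened word list and detecting frequent words as runs of length >= min_freq in one linear scan; the returned vocab is collected during the rewrite pass itself.
import Mathlib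
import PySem

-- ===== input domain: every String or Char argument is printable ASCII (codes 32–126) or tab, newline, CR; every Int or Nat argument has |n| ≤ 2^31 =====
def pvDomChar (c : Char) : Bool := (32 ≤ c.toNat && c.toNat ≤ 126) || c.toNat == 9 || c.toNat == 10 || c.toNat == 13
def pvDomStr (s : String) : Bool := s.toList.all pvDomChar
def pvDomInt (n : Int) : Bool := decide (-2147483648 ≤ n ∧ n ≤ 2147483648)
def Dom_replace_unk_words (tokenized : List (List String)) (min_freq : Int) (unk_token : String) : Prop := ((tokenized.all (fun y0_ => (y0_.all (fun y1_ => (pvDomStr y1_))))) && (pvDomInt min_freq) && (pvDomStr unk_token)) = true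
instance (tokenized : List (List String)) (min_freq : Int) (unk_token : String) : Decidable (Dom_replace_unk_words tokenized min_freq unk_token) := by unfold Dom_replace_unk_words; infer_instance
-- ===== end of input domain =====

-- B counts by sorting instead of hashing: frequent words are runs of length >= min_freq
-- in the sorted flattened word list, and the returned vocab is collected during the
-- rewrite pass (objective: alternative — a different algorithm of similar cost).

-- ===== PORT A =====
def replace_unk_words (tokenized : List (List String)) (min_freq : Int) (unk_token : String) : List (List String) × List String :=
  -- freq = Counter(); for sentence in tokenized: freq.update(sentence)
  let freq : PySem.Dict String Int :=
    tokenized.foldl (fun d sentence => sentence.foldl (fun d w => d.modify w 0 (· + 1)) d) PySem.Dict.empty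
  -- vocab = set(); for word, count in freq.items(): if count >= min_freq: vocab.add(word)
  let vocab : PySem.Set String :=
    freq.items.foldl (fun v kc => if kc.2 ≥ min_freq then PySem.Set.add v kc.1 else v) PySem.Set.empty
  -- new_tokenized rewrite loop
  let new_tokenized : List (List String) :=
    tokenized.foldl (fun acc sentence =>
      acc ++ [sentence.foldl (fun ns w =>
        ns ++ [if PySem.Set.contains vocab w then w else unk_token]) []]) []
  -- vocab.add(unk_token); return
  (new_tokenized, PySem.Set.add vocab unk_token)

-- ===== PORT B =====
def replace_unk_words_alt (tokenized : List (List String)) (min_freq : Int) (unk_token : String) : List (List String) × List String :=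
  -- sw = sorted(w for sentence in tokenized for w in sentence)
  let sw : List String := PySem.List.sorted tokenized.flatten (fun x => x) false
  -- run-length scan over the sorted list: keep = words whose run reaches min_freq
  let scan : PySem.Set String × Option String × Int :=
    sw.foldl (fun st w =>
      let run : Int := if some w = st.2.1 then st.2.2 + 1 else 1
      ((if run ≥ min_freq then PySem.Set.add st.1 w else st.1), some w, run))
      (PySem.Set.empty, none, 0)
  let keep : PySem.Set String := scan.1
  -- rewrite pass, collecting vocab (kept words in occurrence order) as it goes
  let res : List (List String) × PySem.Set String :=
    tokenized.foldl (fun (acc : List (List String) × PySem.Set String) sentence =>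
      let inner := sentence.foldl (fun (p : List String × PySem.Set String) w =>
        if PySem.Set.contains keep w then (p.1 ++ [w], PySem.Set.add p.2 w)
        else (p.1 ++ [unk_token], p.2)) (([] : List String), acc.2)
      (acc.1 ++ [inner.1], inner.2)) (([] : List (List String)), (PySem.Set.empty : PySem.Set String))
  -- vocab.add(unk_token); return
  (res.1, PySem.Set.add res.2 unk_token)

-- ===== PRECONDITION & SPEC =====
def Spec_replace_unk_words (tokenized : List (List String)) (min_freq : Int) (unk_token : String) (out : List (List String) × List String) : Prop := out = replace_unk_words_alt tokenized min_freq unk_token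
instance (tokenized : List (List String)) (min_freq : Int) (unk_token : String) (out : List (List String) × List String) : Decidable (Spec_replace_unk_words tokenized min_freq unk_token out) := by unfold Spec_replace_unk_words; infer_instance

-- ===== CLAIM (what is proved, stated in full; the proofs are below) =====
def Claim_equal_replace_unk_words : Prop := ∀ (tokenized : List (List String)) (min_freq : Int) (unk_token : String), Dom_replace_unk_words tokenized min_freq unk_token → Spec_replace_unk_words tokenized min_freq unk_token (replace_unk_words tokenized min_freq unk_token)

-- ===== LEMMAS AND PROOFS =====

theorem pvFilterAdd (s : PySem.Set String) (q : String → Bool) (x : String) :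
    (PySem.Set.add s x).filter q = if q x then PySem.Set.add (s.filter q) x else s.filter q := by
  unfold PySem.Set.add
  by_cases hm : x ∈ s <;> by_cases hq : q x = true <;>
    simp [hm, hq, List.mem_filter, List.filter_append]

theorem pvFilterUpdate (xs : List String) (s : PySem.Set String) (q : String → Bool) :
    (PySem.Set.update s xs).filter q = PySem.Set.update (s.filter q) (xs.filter q) := by
  induction xs generalizing s with
  | nil => simp [PySem.Set.update]
  | cons x xs ih =>
    rw [PySem.Set.update_cons, ih, pvFilterAdd]
    by_cases hq : q x = true <;> simp [hq, PySem.Set.update_cons]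

theorem pvFilterOfList (xs : List String) (q : String → Bool) :
    (PySem.Set.ofList xs).filter q = PySem.Set.ofList (xs.filter q) := by
  rw [← PySem.Set.update_nil_left, pvFilterUpdate]
  simp only [List.filter_nil, PySem.Set.update_nil_left]

theorem pvOfListNodup (l : List String) (h : l.Nodup) : PySem.Set.ofList l = l := by
  rw [← PySem.Set.update_nil_left]
  exact (PySem.Set.update_eq_append_of_disjoint [] l h (by simp)).trans (List.nil_append l)

-- both ports equal this common canonical value
theorem pvA_eq (tokenized : List (List String)) (min_freq : Int) (unk_token : String) :
    replace_unk_words tokenized min_freq unk_token =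
      (tokenized.map (fun s => s.map (fun w =>
          if (tokenized.flatten.count w : Int) ≥ min_freq then w else unk_token)),
       PySem.Set.add (PySem.Set.ofList (tokenized.flatten.filter
          (fun w => decide ((tokenized.flatten.count w : Int) ≥ min_freq)))) unk_token) := by
  simp only [replace_unk_words]
  have hemp : (PySem.Set.empty : PySem.Set String) = [] := rfl
  have hfreq :
      tokenized.foldl (fun d sentence => sentence.foldl (fun d w => d.modify w 0 (· + 1)) d) PySem.Dict.empty
        = PySem.Dict.counter tokenized.flatten := by
    rw [PySem.Dict.counter_eq_foldl, List.foldl_flatten]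
  rw [hfreq]
  have hvocab :
      (PySem.Dict.counter tokenized.flatten).items.foldl
          (fun v kc => if kc.2 ≥ min_freq then PySem.Set.add v kc.1 else v) PySem.Set.empty
        = PySem.Set.ofList (tokenized.flatten.filter
            (fun w => decide ((tokenized.flatten.count w : Int) ≥ min_freq))) := by
    rw [PySem.Dict.items_counter, List.foldl_map]
    simp only []
    rw [PySem.List.foldl_ite_eq_foldl_filter
          (fun k => ((tokenized.flatten.count k : Int) ≥ min_freq)) PySem.Set.add]
    rw [hemp, ← PySem.Set.ofList_eq_foldl, pvFilterOfList]
    exact pvOfListNodup _ (PySem.Set.nodup_ofList _)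
  rw [hvocab]
  simp only [PySem.List.foldl_append_singleton_eq_map, List.nil_append]
  rw [Prod.mk.injEq]
  refine ⟨?_, rfl⟩
  apply List.map_congr_left
  intro s hs
  apply List.map_congr_left
  intro w hw
  have hwmem : w ∈ tokenized.flatten := List.mem_flatten.mpr ⟨s, hs, hw⟩
  have hiff : (PySem.Set.contains (PySem.Set.ofList (tokenized.flatten.filter
        (fun w => decide ((tokenized.flatten.count w : Int) ≥ min_freq)))) w = true)
      ↔ ((tokenized.flatten.count w : Int) ≥ min_freq) := by
    rw [PySem.Set.contains_iff, PySem.Set.mem_ofList, List.mem_filter]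
    simp [hwmem]
  exact if_congr hiff rfl rfl

-- the run-length scan over a sorted list collects exactly the words of count ≥ mf
theorem pvScanMem (mf : Int) (l : List String) (k : PySem.Set String) (p : Option String) (r : Int)
    (h1 : l.Pairwise (· ≤ ·))
    (h2 : ∀ q, p = some q → ∀ x ∈ l, q ≤ x) (w : String) :
    (w ∈ (l.foldl (fun (st : PySem.Set String × Option String × Int) x =>
        let run : Int := if some x = st.2.1 then st.2.2 + 1 else 1
        ((if run ≥ mf then PySem.Set.add st.1 x else st.1), some x, run)) (k, p, r)).1)
      ↔ w ∈ k ∨ (w ∈ l ∧ mf ≤ (l.count w : Int) + (if p = some w then r else 0)) := by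
  induction l generalizing k p r with
  | nil => simp
  | cons x t ih =>
    have ht : t.Pairwise (· ≤ ·) := h1.tail
    have hxle : ∀ y ∈ t, x ≤ y := fun y hy => List.rel_of_pairwise_cons h1 hy
    have h2' : ∀ q, (some x : Option String) = some q → ∀ y ∈ t, q ≤ y := by
      rintro q hq y hy; cases hq; exact hxle y hy
    simp only [List.foldl_cons]
    refine Iff.trans (ih (if (if some x = p then r + 1 else 1) ≥ mf then PySem.Set.add k x else k)
        (some x) (if some x = p then r + 1 else 1) ht h2') ?_
    have hc0 : (0 : Int) ≤ (t.count w : Int) := Int.natCast_nonneg _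
    by_cases hwx : w = x
    · subst hwx
      have hcc : (((w :: t).count w : Int)) = (t.count w : Int) + 1 := by
        rw [List.count_cons_self]; push_cast; ring
      by_cases hxp : some w = p
      · subst hxp
        simp only [if_true, List.mem_cons, true_or, true_and, hcc]
        by_cases hge : r + 1 ≥ mf
        · rw [if_pos hge]
          simp only [PySem.Set.mem_add]
          constructor
          · rintro ((h | -) | ⟨hwt, hc⟩)
            · exact Or.inl h
            · exact Or.inr (by omega)
            · exact Or.inr (by omega)
          · rintro (h | hc)
            · exact Or.inl (Or.inl h)
            · by_cases hwt : w ∈ t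
              · have h1c : (1 : Int) ≤ (t.count w : Int) := by
                  exact_mod_cast List.one_le_count_iff.mpr hwt
                exact Or.inr ⟨hwt, by omega⟩
              · exact Or.inl (Or.inr trivial)
        · rw [if_neg hge]
          constructor
          · rintro (h | ⟨hwt, hc⟩)
            · exact Or.inl h
            · exact Or.inr (by omega)
          · rintro (h | hc)
            · exact Or.inl h
            · have hwt : w ∈ t := by
                by_contra hwt
                have h0 : (t.count w : Int) = 0 := by
                  exact_mod_cast List.count_eq_zero_of_not_mem hwt
                omega
              exact Or.inr ⟨hwt, by omega⟩
      · have hpw : ¬ (p = some w) := fun h => hxp h.symm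
        simp only [if_neg hxp, if_true, if_neg hpw, List.mem_cons, true_or,
          true_and, hcc, add_zero]
        by_cases hge : (1 : Int) ≥ mf
        · rw [if_pos hge]
          simp only [PySem.Set.mem_add]
          constructor
          · rintro ((h | -) | ⟨hwt, hc⟩)
            · exact Or.inl h
            · exact Or.inr (by omega)
            · exact Or.inr (by omega)
          · rintro (h | hc)
            · exact Or.inl (Or.inl h)
            · exact Or.inl (Or.inr trivial)
        · rw [if_neg hge]
          constructor
          · rintro (h | ⟨hwt, hc⟩)
            · exact Or.inl h
            · exact Or.inr (by omega)
          · rintro (h | hc)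
            · exact Or.inl h
            · have hwt : w ∈ t := by
                by_contra hwt
                have h0 : (t.count w : Int) = 0 := by
                  exact_mod_cast List.count_eq_zero_of_not_mem hwt
                omega
              exact Or.inr ⟨hwt, by omega⟩
    · have hsx : ¬ ((some x : Option String) = some w) := by
        intro h; exact hwx (Option.some.inj h).symm
      have hwx' : ¬ x = w := fun h => hwx h.symm
      have hcnt : (((x :: t).count w : Int)) = (t.count w : Int) := by
        simp [hwx']
      have hK : (w ∈ (if (if some x = p then r + 1 else 1) ≥ mf then PySem.Set.add k x else k))
          ↔ w ∈ k := by
        have hadd : w ∈ PySem.Set.add k x ↔ w ∈ k := by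
          rw [PySem.Set.mem_add]
          constructor
          · rintro (h | rfl)
            · exact h
            · exact absurd rfl hwx
          · exact Or.inl
        split_ifs <;> simp [hadd]
      rw [hK, if_neg hsx]
      simp only [add_zero, List.mem_cons, hcnt]
      by_cases hpw : p = some w
      · have hnt : w ∉ t := fun hwt =>
          hwx (le_antisymm (h2 w hpw x List.mem_cons_self) (hxle w hwt))
        rw [if_pos hpw]
        constructor
        · rintro (h | ⟨hwt, _⟩)
          · exact Or.inl h
          · exact absurd hwt hnt
        · rintro (h | ⟨(rfl | hwt), _⟩)
          · exact Or.inl h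
          · exact absurd rfl hwx
          · exact absurd hwt hnt
      · rw [if_neg hpw]
        simp only [add_zero]
        constructor
        · rintro (h | ⟨hwt, hc⟩)
          · exact Or.inl h
          · exact Or.inr ⟨Or.inr hwt, hc⟩
        · rintro (h | ⟨(rfl | hwt), hc⟩)
          · exact Or.inl h
          · exact absurd rfl hwx
          · exact Or.inr ⟨hwt, hc⟩

-- B's fused inner loop, with an arbitrary Bool test t, splits into its two components
theorem pvBsplit (t : String → Bool) (unk : String) (l : List String)
    (a : List String) (b : PySem.Set String) :
    l.foldl (fun (q : List String × PySem.Set String) w =>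
        if t w then (q.1 ++ [w], PySem.Set.add q.2 w) else (q.1 ++ [unk], q.2)) (a, b)
      = (l.foldl (fun ns w => ns ++ [if t w then w else unk]) a,
         l.foldl (fun v w => if t w then PySem.Set.add v w else v) b) := by
  induction l generalizing a b with
  | nil => rfl
  | cons w l ih => by_cases h : t w <;> simp [h, ih]

-- the split-form outer loop is a pair of independent folds
theorem pvBouter2 (t : String → Bool) (unk : String) (L : List (List String))
    (a : List (List String)) (b : PySem.Set String) :
    L.foldl (fun (acc : List (List String) × PySem.Set String) sentence =>
        (acc.1 ++ [sentence.foldl (fun ns w => ns ++ [if t w then w else unk]) []],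
         sentence.foldl (fun v w => if t w then PySem.Set.add v w else v) acc.2)) (a, b)
      = (L.foldl (fun acc sentence =>
            acc ++ [sentence.foldl (fun ns w => ns ++ [if t w then w else unk]) []]) a,
         L.foldl (fun v sentence =>
            sentence.foldl (fun v w => if t w then PySem.Set.add v w else v) v) b) := by
  induction L generalizing a b with
  | nil => rfl
  | cons s L ih => simp only [List.foldl_cons]; exact ih _ _

-- B's fused outer loop splits into its two independent components
theorem pvBouter (t : String → Bool) (unk : String) (L : List (List String))
    (a : List (List String)) (b : PySem.Set String) :
    L.foldl (fun (acc : List (List String) × PySem.Set String) sentence =>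
        (acc.1 ++ [(sentence.foldl (fun (q : List String × PySem.Set String) w =>
            if t w then (q.1 ++ [w], PySem.Set.add q.2 w) else (q.1 ++ [unk], q.2)) ([], acc.2)).1],
         (sentence.foldl (fun (q : List String × PySem.Set String) w =>
            if t w then (q.1 ++ [w], PySem.Set.add q.2 w) else (q.1 ++ [unk], q.2)) ([], acc.2)).2)) (a, b)
      = (L.foldl (fun acc sentence =>
            acc ++ [sentence.foldl (fun ns w => ns ++ [if t w then w else unk]) []]) a,
         L.foldl (fun v sentence =>
            sentence.foldl (fun v w => if t w then PySem.Set.add v w else v) v) b) := by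
  have hsp : (fun (acc : List (List String) × PySem.Set String) (sentence : List String) =>
        (acc.1 ++ [(sentence.foldl (fun (q : List String × PySem.Set String) w =>
            if t w then (q.1 ++ [w], PySem.Set.add q.2 w) else (q.1 ++ [unk], q.2)) ([], acc.2)).1],
         (sentence.foldl (fun (q : List String × PySem.Set String) w =>
            if t w then (q.1 ++ [w], PySem.Set.add q.2 w) else (q.1 ++ [unk], q.2)) ([], acc.2)).2))
      = (fun (acc : List (List String) × PySem.Set String) sentence =>
        (acc.1 ++ [sentence.foldl (fun ns w => ns ++ [if t w then w else unk]) []],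
         sentence.foldl (fun v w => if t w then PySem.Set.add v w else v) acc.2)) := by
    funext acc sentence
    rw [pvBsplit]
  rw [hsp]
  exact pvBouter2 t unk L a b

theorem pvB_eq (tokenized : List (List String)) (min_freq : Int) (unk_token : String) :
    replace_unk_words_alt tokenized min_freq unk_token =
      (tokenized.map (fun s => s.map (fun w =>
          if (tokenized.flatten.count w : Int) ≥ min_freq then w else unk_token)),
       PySem.Set.add (PySem.Set.ofList (tokenized.flatten.filter
          (fun w => decide ((tokenized.flatten.count w : Int) ≥ min_freq)))) unk_token) := by
  simp only [replace_unk_words_alt]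
  have hemp : (PySem.Set.empty : PySem.Set String) = [] := rfl
  set flat := tokenized.flatten with hflatdef
  set sw := PySem.List.sorted flat (fun x => x) false with hswdef
  set keep := (sw.foldl (fun (st : PySem.Set String × Option String × Int) w =>
      let run : Int := if some w = st.2.1 then st.2.2 + 1 else 1
      ((if run ≥ min_freq then PySem.Set.add st.1 w else st.1), some w, run))
      (PySem.Set.empty, none, 0)).1 with hkeepdef
  -- membership in keep is the count test, for words occurring in the input
  have hperm : sw.Perm flat := PySem.List.sorted_perm flat (fun x => x) false
  have hkeep : ∀ w ∈ flat, PySem.Set.contains keep w = decide ((flat.count w : Int) ≥ min_freq) := by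
    intro w hw
    have hmem : w ∈ keep ↔ w ∈ sw ∧ min_freq ≤ (sw.count w : Int) + 0 := by
      rw [hkeepdef]
      have := pvScanMem min_freq sw PySem.Set.empty none 0
        (by simpa using PySem.List.sorted_pairwise flat (fun x => x))
        (by rintro q ⟨⟩) w
      simpa [hemp] using this
    have hsw' : w ∈ sw := hperm.mem_iff.mpr hw
    have hcnt : sw.count w = flat.count w := hperm.count_eq w
    by_cases hq : ((flat.count w : Int) ≥ min_freq)
    · simp only [hq, decide_true]
      rw [PySem.Set.contains_iff]
      exact hmem.mpr ⟨hsw', by rw [hcnt]; omega⟩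
    · simp only [hq, decide_false]
      rw [← Bool.not_eq_true, PySem.Set.contains_iff]
      intro hcon
      exact hq (by have := (hmem.mp hcon).2; rw [hcnt] at this; omega)
  rw [pvBouter (fun w => PySem.Set.contains keep w) unk_token tokenized [] PySem.Set.empty]
  rw [Prod.mk.injEq]
  constructor
  · simp only [PySem.List.foldl_append_singleton_eq_map, List.nil_append]
    apply List.map_congr_left
    intro s hs
    apply List.map_congr_left
    intro w hw
    have hwf : w ∈ flat := List.mem_flatten.mpr ⟨s, hs, hw⟩
    rw [hkeep w hwf]
    by_cases hq : ((flat.count w : Int) ≥ min_freq) <;> simp [hq]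
  · have hfl :
        tokenized.foldl (fun (v : PySem.Set String) (sentence : List String) =>
          sentence.foldl (fun v w => if PySem.Set.contains keep w then PySem.Set.add v w else v) v) PySem.Set.empty
          = flat.foldl (fun v w => if PySem.Set.contains keep w then PySem.Set.add v w else v) PySem.Set.empty := by
      rw [hflatdef, List.foldl_flatten]
    rw [hfl]
    refine congrArg (fun s => PySem.Set.add s unk_token) ?_
    show flat.foldl (fun v w => if PySem.Set.contains keep w then PySem.Set.add v w else v) PySem.Set.empty = _
    have hcg : flat.foldl (fun v w => if PySem.Set.contains keep w then PySem.Set.add v w else v) PySem.Set.empty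
        = flat.foldl (fun v w => if (flat.count w : Int) ≥ min_freq then PySem.Set.add v w else v) PySem.Set.empty := by
      apply PySem.List.foldl_congr_mem'
      intro x hx acc
      rw [hkeep x hx]
      by_cases hq : ((flat.count x : Int) ≥ min_freq) <;> simp [hq]
    rw [hcg, PySem.List.foldl_ite_eq_foldl_filter (fun w => ((flat.count w : Int) ≥ min_freq)) PySem.Set.add]
    rw [hemp, ← PySem.Set.ofList_eq_foldl]

-- ===== VERDICT (by name: the statement is the Claim_ definition above) =====
theorem replace_unk_words_spec : Claim_equal_replace_unk_words := by
  intro tokenized min_freq unk_token _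
  unfold Spec_replace_unk_words
  rw [pvA_eq, pvB_eq]
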